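-- pv_equiv track=rewrite | github.com/ttaerrim/algorithm | programmers/67256.py | solution
-- ===== SOURCE A (Python) =====
-- def whichFinger(left, right, num, hand):
--     distance = [0, 1, 2, 1, 2, 3, 2, 3, 4, 3, 4, 5]
--     left_to_num = distance[abs(left-num)]
--     right_to_num = distance[abs(right-num)]
--
--     if left_to_num == right_to_num:
--         return "R" if hand == "right" else "L"
--     elif left_to_num < right_to_num:
--         return "L"
--     else:
--         return "R"
--
-- def solution(numbers, hand):
--     answer = ''
--     left_finger, right_finger = 10, 12
--     for num in numbers:
--         if num == 0:
--             num = 11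
--         if num == 1 or num == 4 or num == 7:
--             answer += "L"
--             left_finger = num
--         elif num == 3 or num == 6 or num == 9:
--             answer += "R"
--             right_finger = num
--         else:
--             finger = whichFinger(left_finger, right_finger, num, hand)
--             answer += finger
--             if finger == "R":
--                 right_finger = num
--             else:
--                 left_finger = num
--
--     return answer
-- ===== SOURCE B (Python) =====
-- def coord(n):
--     k = 10 if n == 0 else n - 1
--     return divmod(k, 3)
--
--
-- def last_pos(pairs, side, start):
--     for letter, m in reversed(pairs):
--         if letter == side:
--             return coord(m)
--     return start
--
--
-- def solution(numbers, hand):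
--     pairs = []
--     for n in numbers:
--         r, c = coord(n)
--         if c == 0:
--             letter = 'L'
--         elif c == 2:
--             letter = 'R'
--         else:
--             lr, lc = last_pos(pairs, 'L', (3, 0))
--             rr, rc = last_pos(pairs, 'R', (3, 2))
--             dl = abs(lr - r) + abs(lc - c)
--             dr = abs(rr - r) + abs(rc - c)
--             letter = 'L' if dl < dr else 'R' if dr < dl else ('R' if hand == 'right' else 'L')
--         pairs.append((letter, n))
--     return ''.join(letter for letter, _ in pairs)
-- ===== Notes on version B (the rewrite author's own statement) =====
-- stated objective: alternative
-- what changed: B keeps no thumb state at all: for each middle-column key it rescans the already-assigned (letter, key) history backwards to recover each thumb's last position, using divmod-derived grid coordinates and Manhattan distance instead of A's carried finger labels and distance-by-index table.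
-- outside the precondition, e.g. on solution([13], 'right'): A returns 'R', B returns 'L'; on solution([-1], 'right'): A raises IndexError, B returns 'R'
import Mathlib
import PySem

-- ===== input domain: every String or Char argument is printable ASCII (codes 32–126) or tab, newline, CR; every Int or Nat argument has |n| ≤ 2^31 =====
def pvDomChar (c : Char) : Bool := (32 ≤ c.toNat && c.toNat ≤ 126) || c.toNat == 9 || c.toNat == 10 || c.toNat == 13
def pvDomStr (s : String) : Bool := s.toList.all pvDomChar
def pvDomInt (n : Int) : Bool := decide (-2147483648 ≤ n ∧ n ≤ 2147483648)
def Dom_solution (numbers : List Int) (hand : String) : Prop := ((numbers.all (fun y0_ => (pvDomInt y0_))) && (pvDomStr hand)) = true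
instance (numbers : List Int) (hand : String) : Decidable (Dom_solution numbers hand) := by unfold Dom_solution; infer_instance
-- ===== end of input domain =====

-- B drops A's carried thumb-label state: it re-derives each thumb's position by scanning the
-- already-assigned (letter, key) history backwards, with divmod coordinates and Manhattan
-- distance (alternative decomposition; O(n^2) vs A's O(n); return value only).

-- ===== PORT A =====
-- the distance table of whichFinger
def pvDistance : List Int := [0, 1, 2, 1, 2, 3, 2, 3, 4, 3, 4, 5]

-- whichFinger; none = IndexError on an out-of-range table index
def whichFinger (left right num : Int) (hand : String) : Option String :=
  match PySem.List.pyGet? pvDistance |left - num|, PySem.List.pyGet? pvDistance |right - num| with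
  | some leftToNum, some rightToNum =>
      if leftToNum == rightToNum then some (if hand == "right" then "R" else "L")
      else if leftToNum < rightToNum then some "L"
      else some "R"
  | _, _ => none

-- the for-loop of A over numbers, carrying (answer, left_finger, right_finger)
def solutionLoopA (ns : List Int) (answer : String) (leftF rightF : Int) (hand : String) :
    Option String :=
  match ns with
  | [] => some answer
  | n :: rest =>
    let num := if n == 0 then 11 else n
    if num == 1 ∨ num == 4 ∨ num == 7 then
      solutionLoopA rest (answer ++ "L") num rightF hand
    else if num == 3 ∨ num == 6 ∨ num == 9 then
      solutionLoopA rest (answer ++ "R") leftF num hand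
    else
      (whichFinger leftF rightF num hand).bind fun finger =>
        if finger == "R" then solutionLoopA rest (answer ++ finger) leftF num hand
        else solutionLoopA rest (answer ++ finger) num rightF hand

def solution (numbers : List Int) (hand : String) : String :=
  (solutionLoopA numbers "" 10 12 hand).getD ""

-- ===== PORT B =====
-- coord(n) of Source B: divmod(10 if n == 0 else n - 1, 3)
def coordB (n : Int) : Int × Int :=
  let k := if n == 0 then (10 : Int) else n - 1
  (PySem.Int.floordiv k 3, PySem.Int.mod k 3)

-- last_pos of Source B: the backward scan over the history, written as recursion on pairs.reverse
def lastPosRev (revPairs : List (String × Int)) (side : String) (start : Int × Int) : Int × Int :=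
  match revPairs with
  | [] => start
  | (letter, m) :: rest =>
      if letter == side then coordB m else lastPosRev rest side start

def lastPos (pairs : List (String × Int)) (side : String) (start : Int × Int) : Int × Int :=
  lastPosRev pairs.reverse side start

-- the for-loop of Source B, carrying the (letter, key) history
def solutionLoopB (ns : List Int) (pairs : List (String × Int)) (hand : String) :
    List (String × Int) :=
  match ns with
  | [] => pairs
  | n :: rest =>
    let rc := coordB n
    let letter :=
      if rc.2 == 0 then "L"
      else if rc.2 == 2 then "R"
      else
        let lp := lastPos pairs "L" (3, 0)
        let rp := lastPos pairs "R" (3, 2)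
        let dl := |lp.1 - rc.1| + |lp.2 - rc.2|
        let dr := |rp.1 - rc.1| + |rp.2 - rc.2|
        if dl < dr then "L" else if dr < dl then "R"
        else if hand == "right" then "R" else "L"
    solutionLoopB rest (pairs ++ [(letter, n)]) hand

def solution_alt (numbers : List Int) (hand : String) : String :=
  String.join ((solutionLoopB numbers [] hand).map Prod.fst)

-- ===== PRECONDITION & SPEC =====
-- Pre_ excludes lists with an element outside 0..9 (not a keypad digit): on those A's
-- out-of-grid label arithmetic raises IndexError or returns an accidental value that is
-- an artefact of its distance table, which B's keypad-coordinate history need not match.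
def Pre_solution (numbers : List Int) (hand : String) : Prop :=
  ∀ n ∈ numbers, 0 ≤ n ∧ n ≤ 9
instance (numbers : List Int) (hand : String) : Decidable (Pre_solution numbers hand) := by
  unfold Pre_solution; infer_instance

def pvWitness_solution : List Int × String := ([1, 3, 4, 5, 8, 2, 1, 4, 5, 9, 5], "right")

def Spec_solution (numbers : List Int) (hand : String) (out : String) : Prop := out = solution_alt numbers hand
instance (numbers : List Int) (hand : String) (out : String) : Decidable (Spec_solution numbers hand out) := by unfold Spec_solution; infer_instance

-- ===== CLAIM (what is proved, stated in full; the proofs are below) =====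
def Claim_equal_solution : Prop := ∀ (numbers : List Int) (hand : String), Dom_solution numbers hand → Pre_solution numbers hand → Spec_solution numbers hand (solution numbers hand)

-- ===== LEMMAS AND PROOFS =====

-- label n (1..12, keypad reading order) → its (row, col) grid coordinate
def coordK (n : Int) : Int × Int := ((n - 1) / 3, (n - 1) % 3)

-- Manhattan distance between two grid points
def mdist (p q : Int × Int) : Int := |p.1 - q.1| + |p.2 - q.2|

-- labels a thumb can carry in A: its own column, plus the middle column
def validL (l : Int) : Prop :=
  l = 1 ∨ l = 4 ∨ l = 7 ∨ l = 10 ∨ l = 2 ∨ l = 5 ∨ l = 8 ∨ l = 11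
def validR (r : Int) : Prop :=
  r = 3 ∨ r = 6 ∨ r = 9 ∨ r = 12 ∨ r = 2 ∨ r = 5 ∨ r = 8 ∨ r = 11

-- on reachable labels, A's table lookup IS the Manhattan distance of the coordinates
lemma lookupL (l num : Int) (hl : validL l) (hn : num = 2 ∨ num = 5 ∨ num = 8 ∨ num = 11) :
    PySem.List.pyGet? pvDistance |l - num| = some (mdist (coordK l) (coordK num)) := by
  rcases hl with rfl | rfl | rfl | rfl | rfl | rfl | rfl | rfl <;>
    rcases hn with rfl | rfl | rfl | rfl <;> decide

lemma lookupR (r num : Int) (hr : validR r) (hn : num = 2 ∨ num = 5 ∨ num = 8 ∨ num = 11) :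
    PySem.List.pyGet? pvDistance |r - num| = some (mdist (coordK r) (coordK num)) := by
  rcases hr with rfl | rfl | rfl | rfl | rfl | rfl | rfl | rfl <;>
    rcases hn with rfl | rfl | rfl | rfl <;> decide

-- A's whichFinger, restated in B's branch order over coordinates
lemma step_mid (l r num nr nc : Int) (hand : String) (hl : validL l) (hr : validR r)
    (hn : num = 2 ∨ num = 5 ∨ num = 8 ∨ num = 11) (hc : coordK num = (nr, nc)) :
    whichFinger l r num hand =
      some (if mdist (coordK l) (nr, nc) < mdist (coordK r) (nr, nc) then "L"
        else if mdist (coordK r) (nr, nc) < mdist (coordK l) (nr, nc) then "R"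
        else if hand == "right" then "R" else "L") := by
  unfold whichFinger
  rw [lookupL l num hl hn, lookupR r num hr hn, hc]
  by_cases h : mdist (coordK l) (nr, nc) = mdist (coordK r) (nr, nc)
  · simp [h]
  · by_cases h2 : mdist (coordK l) (nr, nc) < mdist (coordK r) (nr, nc)
    · simp [beq_iff_eq, h, h2]
    · have h3 : mdist (coordK r) (nr, nc) < mdist (coordK l) (nr, nc) :=
        lt_of_le_of_ne (not_lt.mp h2) fun hba => h hba.symm
      simp [beq_iff_eq, h, h2, h3]

-- appending one step to the history moves the matching thumb and leaves the other
lemma lastPos_append (pairs : List (String × Int)) (s side : String) (n : Int)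
    (start : Int × Int) :
    lastPos (pairs ++ [(s, n)]) side start =
      if s == side then coordB n else lastPos pairs side start := by
  simp [lastPos, lastPosRev]

lemma join_append (xs : List String) (y : String) :
    String.join (xs ++ [y]) = String.join xs ++ y := by
  simp [String.join, List.foldl_append, List.foldl]

set_option maxHeartbeats 1000000 in
theorem loops_eq (ns : List Int) :
    ∀ (l r : Int) (pairs : List (String × Int)) (hand : String),
      (∀ n ∈ ns, 0 ≤ n ∧ n ≤ 9) → validL l → validR r →
      lastPos pairs "L" (3, 0) = coordK l → lastPos pairs "R" (3, 2) = coordK r →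
      solutionLoopA ns (String.join (pairs.map Prod.fst)) l r hand =
        some (String.join ((solutionLoopB ns pairs hand).map Prod.fst)) := by
  induction ns with
  | nil => intro l r pairs hand _ _ _ _ _; rfl
  | cons n rest ih =>
    intro l r pairs hand hpre hl hr hL hR
    obtain ⟨hn0, hn9⟩ := hpre n (List.mem_cons_self ..)
    have hrest : ∀ m ∈ rest, 0 ≤ m ∧ m ≤ 9 := fun m hm => hpre m (List.mem_cons_of_mem _ hm)
    interval_cases n
    · -- n = 0: middle column (label 11)
      simp only [solutionLoopA, solutionLoopB]
      norm_num
      rw [step_mid l r 11 3 1 hand hl hr (by norm_num) (by decide)]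
      simp only [show coordB 0 = ((3:Int), (1:Int)) from by decide, hL, hR, mdist]
      norm_num
      by_cases h1 : |(coordK l).1 - 3| + |(coordK l).2 - 1| < |(coordK r).1 - 3| + |(coordK r).2 - 1|
      · norm_num [h1]
        have h := ih 11 r (pairs ++ [("L", 0)]) hand hrest (by simp [validL]) hr (by simp [lastPos_append]; decide) (by simp [lastPos_append, hR])
        simp only [List.map_append, List.map_cons, List.map_nil, join_append] at h
        exact h
      · by_cases h2 : |(coordK r).1 - 3| + |(coordK r).2 - 1| < |(coordK l).1 - 3| + |(coordK l).2 - 1|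
        · norm_num [h1, h2]
          have h := ih l 11 (pairs ++ [("R", 0)]) hand hrest hl (by simp [validR]) (by simp [lastPos_append, hL]) (by simp [lastPos_append]; decide)
          simp only [List.map_append, List.map_cons, List.map_nil, join_append] at h
          exact h
        · by_cases h3 : hand = "right"
          · subst h3
            norm_num [h1, h2]
            have h := ih l 11 (pairs ++ [("R", 0)]) "right" hrest hl (by simp [validR]) (by simp [lastPos_append, hL]) (by simp [lastPos_append]; decide)
            simp only [List.map_append, List.map_cons, List.map_nil, join_append] at h
            exact h
          · norm_num [h1, h2, h3]
            have h := ih 11 r (pairs ++ [("L", 0)]) hand hrest (by simp [validL]) hr (by simp [lastPos_append]; decide) (by simp [lastPos_append, hR])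
            simp only [List.map_append, List.map_cons, List.map_nil, join_append] at h
            exact h
    · -- n = 1: left column
      simp only [solutionLoopA, solutionLoopB]
      norm_num
      simp only [show coordB 1 = ((0:Int), (0:Int)) from by decide]
      norm_num
      have h := ih 1 r (pairs ++ [("L", 1)]) hand hrest (by simp [validL]) hr (by simp [lastPos_append]; decide) (by simp [lastPos_append, hR])
      simp only [List.map_append, List.map_cons, List.map_nil, join_append] at h
      exact h
    · -- n = 2: middle column (label 2)
      simp only [solutionLoopA, solutionLoopB]
      norm_num
      rw [step_mid l r 2 0 1 hand hl hr (by norm_num) (by decide)]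
      simp only [show coordB 2 = ((0:Int), (1:Int)) from by decide, hL, hR, mdist]
      norm_num
      by_cases h1 : |(coordK l).1| + |(coordK l).2 - 1| < |(coordK r).1| + |(coordK r).2 - 1|
      · norm_num [h1]
        have h := ih 2 r (pairs ++ [("L", 2)]) hand hrest (by simp [validL]) hr (by simp [lastPos_append]; decide) (by simp [lastPos_append, hR])
        simp only [List.map_append, List.map_cons, List.map_nil, join_append] at h
        exact h
      · by_cases h2 : |(coordK r).1| + |(coordK r).2 - 1| < |(coordK l).1| + |(coordK l).2 - 1|
        · norm_num [h1, h2]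
          have h := ih l 2 (pairs ++ [("R", 2)]) hand hrest hl (by simp [validR]) (by simp [lastPos_append, hL]) (by simp [lastPos_append]; decide)
          simp only [List.map_append, List.map_cons, List.map_nil, join_append] at h
          exact h
        · by_cases h3 : hand = "right"
          · subst h3
            norm_num [h1, h2]
            have h := ih l 2 (pairs ++ [("R", 2)]) "right" hrest hl (by simp [validR]) (by simp [lastPos_append, hL]) (by simp [lastPos_append]; decide)
            simp only [List.map_append, List.map_cons, List.map_nil, join_append] at h
            exact h
          · norm_num [h1, h2, h3]
            have h := ih 2 r (pairs ++ [("L", 2)]) hand hrest (by simp [validL]) hr (by simp [lastPos_append]; decide) (by simp [lastPos_append, hR])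
            simp only [List.map_append, List.map_cons, List.map_nil, join_append] at h
            exact h
    · -- n = 3: right column
      simp only [solutionLoopA, solutionLoopB]
      norm_num
      simp only [show coordB 3 = ((0:Int), (2:Int)) from by decide]
      norm_num
      have h := ih l 3 (pairs ++ [("R", 3)]) hand hrest hl (by simp [validR]) (by simp [lastPos_append, hL]) (by simp [lastPos_append]; decide)
      simp only [List.map_append, List.map_cons, List.map_nil, join_append] at h
      exact h
    · -- n = 4: left column
      simp only [solutionLoopA, solutionLoopB]
      norm_num
      simp only [show coordB 4 = ((1:Int), (0:Int)) from by decide]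
      norm_num
      have h := ih 4 r (pairs ++ [("L", 4)]) hand hrest (by simp [validL]) hr (by simp [lastPos_append]; decide) (by simp [lastPos_append, hR])
      simp only [List.map_append, List.map_cons, List.map_nil, join_append] at h
      exact h
    · -- n = 5: middle column (label 5)
      simp only [solutionLoopA, solutionLoopB]
      norm_num
      rw [step_mid l r 5 1 1 hand hl hr (by norm_num) (by decide)]
      simp only [show coordB 5 = ((1:Int), (1:Int)) from by decide, hL, hR, mdist]
      norm_num
      by_cases h1 : |(coordK l).1 - 1| + |(coordK l).2 - 1| < |(coordK r).1 - 1| + |(coordK r).2 - 1|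
      · norm_num [h1]
        have h := ih 5 r (pairs ++ [("L", 5)]) hand hrest (by simp [validL]) hr (by simp [lastPos_append]; decide) (by simp [lastPos_append, hR])
        simp only [List.map_append, List.map_cons, List.map_nil, join_append] at h
        exact h
      · by_cases h2 : |(coordK r).1 - 1| + |(coordK r).2 - 1| < |(coordK l).1 - 1| + |(coordK l).2 - 1|
        · norm_num [h1, h2]
          have h := ih l 5 (pairs ++ [("R", 5)]) hand hrest hl (by simp [validR]) (by simp [lastPos_append, hL]) (by simp [lastPos_append]; decide)
          simp only [List.map_append, List.map_cons, List.map_nil, join_append] at h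
          exact h
        · by_cases h3 : hand = "right"
          · subst h3
            norm_num [h1, h2]
            have h := ih l 5 (pairs ++ [("R", 5)]) "right" hrest hl (by simp [validR]) (by simp [lastPos_append, hL]) (by simp [lastPos_append]; decide)
            simp only [List.map_append, List.map_cons, List.map_nil, join_append] at h
            exact h
          · norm_num [h1, h2, h3]
            have h := ih 5 r (pairs ++ [("L", 5)]) hand hrest (by simp [validL]) hr (by simp [lastPos_append]; decide) (by simp [lastPos_append, hR])
            simp only [List.map_append, List.map_cons, List.map_nil, join_append] at h
            exact h
    · -- n = 6: right column
      simp only [solutionLoopA, solutionLoopB]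
      norm_num
      simp only [show coordB 6 = ((1:Int), (2:Int)) from by decide]
      norm_num
      have h := ih l 6 (pairs ++ [("R", 6)]) hand hrest hl (by simp [validR]) (by simp [lastPos_append, hL]) (by simp [lastPos_append]; decide)
      simp only [List.map_append, List.map_cons, List.map_nil, join_append] at h
      exact h
    · -- n = 7: left column
      simp only [solutionLoopA, solutionLoopB]
      norm_num
      simp only [show coordB 7 = ((2:Int), (0:Int)) from by decide]
      norm_num
      have h := ih 7 r (pairs ++ [("L", 7)]) hand hrest (by simp [validL]) hr (by simp [lastPos_append]; decide) (by simp [lastPos_append, hR])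
      simp only [List.map_append, List.map_cons, List.map_nil, join_append] at h
      exact h
    · -- n = 8: middle column (label 8)
      simp only [solutionLoopA, solutionLoopB]
      norm_num
      rw [step_mid l r 8 2 1 hand hl hr (by norm_num) (by decide)]
      simp only [show coordB 8 = ((2:Int), (1:Int)) from by decide, hL, hR, mdist]
      norm_num
      by_cases h1 : |(coordK l).1 - 2| + |(coordK l).2 - 1| < |(coordK r).1 - 2| + |(coordK r).2 - 1|
      · norm_num [h1]
        have h := ih 8 r (pairs ++ [("L", 8)]) hand hrest (by simp [validL]) hr (by simp [lastPos_append]; decide) (by simp [lastPos_append, hR])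
        simp only [List.map_append, List.map_cons, List.map_nil, join_append] at h
        exact h
      · by_cases h2 : |(coordK r).1 - 2| + |(coordK r).2 - 1| < |(coordK l).1 - 2| + |(coordK l).2 - 1|
        · norm_num [h1, h2]
          have h := ih l 8 (pairs ++ [("R", 8)]) hand hrest hl (by simp [validR]) (by simp [lastPos_append, hL]) (by simp [lastPos_append]; decide)
          simp only [List.map_append, List.map_cons, List.map_nil, join_append] at h
          exact h
        · by_cases h3 : hand = "right"
          · subst h3
            norm_num [h1, h2]
            have h := ih l 8 (pairs ++ [("R", 8)]) "right" hrest hl (by simp [validR]) (by simp [lastPos_append, hL]) (by simp [lastPos_append]; decide)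
            simp only [List.map_append, List.map_cons, List.map_nil, join_append] at h
            exact h
          · norm_num [h1, h2, h3]
            have h := ih 8 r (pairs ++ [("L", 8)]) hand hrest (by simp [validL]) hr (by simp [lastPos_append]; decide) (by simp [lastPos_append, hR])
            simp only [List.map_append, List.map_cons, List.map_nil, join_append] at h
            exact h
    · -- n = 9: right column
      simp only [solutionLoopA, solutionLoopB]
      norm_num
      simp only [show coordB 9 = ((2:Int), (2:Int)) from by decide]
      norm_num
      have h := ih l 9 (pairs ++ [("R", 9)]) hand hrest hl (by simp [validR]) (by simp [lastPos_append, hL]) (by simp [lastPos_append]; decide)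
      simp only [List.map_append, List.map_cons, List.map_nil, join_append] at h
      exact h
-- ===== VERDICT (by name: the statement is the Claim_ definition above) =====
theorem solution_spec : Claim_equal_solution := by
  intro numbers hand _ hpre
  unfold Spec_solution solution solution_alt
  have h := loops_eq numbers 10 12 [] hand hpre (by simp [validL]) (by simp [validR])
    (by decide) (by decide)
  have he : String.join (([] : List (String × Int)).map Prod.fst) = "" := rfl
  rw [he] at h
  rw [h]
  rfl
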